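-- pv_equiv track=rewrite | github.com/slackjawed12/codetest | 백준/Bronze/2204. 도비의 난독증 테스트/도비의 난독증 테스트.py | solve
-- ===== SOURCE A (Python) =====
-- from typing import List
--
-- def solve(words: List[str]) -> str:
--     result = None
--     for word in words:
--         if result is None:
--             result = word
--         else:
--             lw = word.lower()
--             lr = result.lower()
--             m = min(lw, lr)
--             result = result if m == lr else word
--
--     return result
-- ===== SOURCE B (Python) =====
-- from typing import List
--
-- def solve(words: List[str]) -> str:
--     if not words:
--         return None
--     return sorted(words, key=str.lower)[0]
-- ===== Notes on version B (the rewrite author's own statement) =====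
-- stated objective: idiomatic
-- what changed: Replaces the manual running-minimum loop (pairwise min of lowercased strings) with a stable sort by str.lower and taking the first element; stability preserves A's earliest-wins tie-breaking. Pre_ excludes only the empty list, on which A returns None rather than a str.
-- outside the precondition, e.g. on solve([]): A returns None, B returns None
import Mathlib
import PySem

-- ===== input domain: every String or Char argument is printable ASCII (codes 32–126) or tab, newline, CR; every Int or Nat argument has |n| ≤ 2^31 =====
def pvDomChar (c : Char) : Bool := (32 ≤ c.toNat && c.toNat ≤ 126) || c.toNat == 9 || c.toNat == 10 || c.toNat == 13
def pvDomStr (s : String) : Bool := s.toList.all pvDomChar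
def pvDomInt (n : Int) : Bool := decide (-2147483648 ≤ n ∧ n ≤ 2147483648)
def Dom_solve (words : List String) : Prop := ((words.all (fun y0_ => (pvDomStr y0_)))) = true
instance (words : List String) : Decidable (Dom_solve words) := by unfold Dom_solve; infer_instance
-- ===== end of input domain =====

-- B replaces A's running-minimum loop with a stable sort by lowercase key and taking the head (idiomatic, same result).


-- ===== PORT A =====
-- A's loop: result starts at None; for each word, keep result if min(word.lower(), result.lower())
-- equals result.lower(), else take word.  The Option accumulator is the 'result is None' state;
-- 'min lw lr == lr' is exactly 'not (lw < lr)'.  The final .getD "" totalizes the None case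
-- (excluded by Pre_solve: there A returns None, not a str).
def solve (words : List String) : String :=
  (words.foldl
    (fun (result : Option String) (word : String) =>
      match result with
      | none => some word
      | some r =>
        if PySem.Str.lower word < PySem.Str.lower r then some word else some r)
    none).getD ""

-- ===== PORT B =====
-- Source B: if not words: return None (excluded by Pre_solve); else sorted(words, key=str.lower)[0].
def solve_alt (words : List String) : String :=
  match PySem.List.sorted words PySem.Str.lower false with
  | [] => ""
  | h :: _ => h

-- ===== PRECONDITION & SPEC =====
-- Pre_ excludes only the empty list, on which A returns None (not a str) and B likewise returns None.
def Pre_solve (words : List String) : Prop := words ≠ []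
instance (words : List String) : Decidable (Pre_solve words) := by unfold Pre_solve; infer_instance
def pvWitness_solve : List String := ["Dobby", "apple"]

def Spec_solve (words : List String) (out : String) : Prop := out = solve_alt words
instance (words : List String) (out : String) : Decidable (Spec_solve words out) := by unfold Spec_solve; infer_instance

-- ===== CLAIM (what is proved, stated in full; the proofs are below) =====
def Claim_equal_solve : Prop := ∀ (words : List String), Dom_solve words → Pre_solve words → Spec_solve words (solve words)

-- ===== LEMMAS AND PROOFS =====

-- A's fold is definitionally PySem.List.min? with key lower.
theorem solve_eq_min? (words : List String) :
    (words.foldl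
      (fun (result : Option String) (word : String) =>
        match result with
        | none => some word
        | some r =>
          if PySem.Str.lower word < PySem.Str.lower r then some word else some r)
      none) = PySem.List.min? words PySem.Str.lower := by
  simp only [PySem.List.min?]
  congr 1
  funext acc x
  cases acc <;> simp

-- Head of the stable insertion sort tracks the first-minimum accumulator.
theorem head?_foldl_insertBy {α κ : Type} [LinearOrder κ] (key : α → κ) :
    ∀ (xs : List α) (acc : List α) (macc : Option α), acc.head? = macc →
      (xs.foldl (fun a x => PySem.List.insertBy (fun a b => decide (key a < key b)) x a) acc).head?
        = xs.foldl
            (fun m x => match m with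
              | none => some x
              | some r => if key x < key r then some x else some r) macc := by
  intro xs
  induction xs with
  | nil => intro acc macc h; simpa using h
  | cons x t ih =>
    intro acc macc h
    cases acc with
    | nil =>
      cases macc with
      | none => exact ih _ _ rfl
      | some m => simp at h
    | cons y ys =>
      cases macc with
      | none => simp at h
      | some m =>
        simp at h
        subst h
        simp only [List.foldl_cons, PySem.List.insertBy]
        by_cases hlt : key x < key y
        · rw [if_pos (by simpa using hlt)]
          rw [ih _ _ rfl]
          simp [hlt]
        · rw [if_neg (by simpa using hlt)]
          rw [ih _ _ rfl]
          simp [hlt]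

theorem head?_sorted_eq_min? {α κ : Type} [LinearOrder κ] (xs : List α) (key : α → κ) :
    (PySem.List.sorted xs key false).head? = PySem.List.min? xs key := by
  have := head?_foldl_insertBy key xs [] none rfl
  simpa [PySem.List.sorted, PySem.List.min?] using this

-- ===== VERDICT (by name: the statement is the Claim_ definition above) =====
theorem solve_spec : Claim_equal_solve := by
  intro words _ hpre
  unfold Spec_solve solve solve_alt
  rw [solve_eq_min?]
  have h := head?_sorted_eq_min? words PySem.Str.lower
  cases hs : PySem.List.sorted words PySem.Str.lower false with
  | nil =>
    exact absurd (((PySem.List.sorted_eq_nil_iff words PySem.Str.lower false).mp hs)) hpre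
  | cons h0 t =>
    rw [hs] at h
    simp only [List.head?_cons] at h
    rw [← h]
    rfl
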